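-- pv_equiv track=rewrite | github.com/rzshrote/pybrops | pybrops/core/util/crossix.py | threewayix_symab_anyab_uniqc
-- ===== SOURCE A (Python) =====
-- from typing import Generator
--
-- def threewayix_symab_anyab_uniqc(ntaxa: int) -> Generator:
--     """
--     Generate indices for three-way parent crosses with the following constraints:
--
--     1) Assume symmetric mate pairings for (AxB) cross: (A x B) == (B x A)
--     2) Allow (AxB) selfing, allow (AxB) outcrossing
--     3) Only permit outcrossing for the recurrent parent: C != (A or B).
--
--     Parameters
--     ----------
--     ntaxa : int
--         Number of taxa eligible to serve as parents.
--
--     Yields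
--     ------
--     out : tuple
--         Tuple of indices. Indices are (recurrent,female,male) == (C x (A x B)).
--     """
--     if ntaxa <= 1:
--         yield from ()
--     for recurrent in range(ntaxa):
--         for female in range(recurrent):
--             for male in range(female,recurrent):
--                 yield (recurrent,female,male)
--             for male in range(recurrent+1,ntaxa):
--                 yield (recurrent,female,male)
--         for female in range(recurrent+1,ntaxa):
--             for male in range(female,ntaxa):
--                 yield (recurrent,female,male)
-- ===== SOURCE B (Python) =====
-- from typing import Generator
--
-- def threewayix_symab_anyab_uniqc(ntaxa: int) -> Generator:
--     """Single flat loop over an explicit (recurrent, female, male) odometer state: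
--     each step yields the current triple and advances the state by carry
--     propagation (male, then female, then recurrent), skipping the recurrent
--     parent's own index."""
--     if ntaxa < 2:
--         return
--     C, f, m = 0, 1, 1
--     while True:
--         yield (C, f, m)
--         # advance male, skipping C
--         m += 1
--         if m == C:
--             m += 1
--         if m < ntaxa:
--             continue
--         # carry: advance female, skipping C; male restarts at female
--         f += 1
--         if f == C:
--             f += 1
--         if f < ntaxa:
--             m = f
--             continue
--         # carry: advance recurrent parent; female/male restart at 0 (never == C here)
--         C += 1
--         if C >= ntaxa:
--             return
--         f = m = 0
-- ===== Notes on version B (the rewrite author's own statement) =====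
-- stated objective: alternative
-- what changed: Replaces A's four nested range loops with a single flat loop over an explicit (recurrent, female, male) odometer state advanced by carry propagation (male, then female, then recurrent), skipping the recurrent index.
import Mathlib
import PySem

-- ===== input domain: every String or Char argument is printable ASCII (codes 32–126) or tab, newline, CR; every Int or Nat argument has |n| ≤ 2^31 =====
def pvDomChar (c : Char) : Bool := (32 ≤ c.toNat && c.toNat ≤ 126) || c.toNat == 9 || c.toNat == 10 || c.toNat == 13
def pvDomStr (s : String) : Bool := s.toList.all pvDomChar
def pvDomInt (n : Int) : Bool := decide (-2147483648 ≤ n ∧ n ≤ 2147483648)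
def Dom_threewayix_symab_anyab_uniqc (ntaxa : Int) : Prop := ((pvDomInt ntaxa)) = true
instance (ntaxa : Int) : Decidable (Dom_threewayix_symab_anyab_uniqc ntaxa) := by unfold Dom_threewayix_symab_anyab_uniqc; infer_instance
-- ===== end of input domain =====

-- B replaces A's four nested range loops by a single flat loop over an explicit
-- (recurrent, female, male) odometer state advanced by carry propagation (objective: alternative).

-- ===== PORT A =====
-- the Python's 'if ntaxa <= 1: yield from ()' yields nothing; ported as the empty prefix
def threewayix_symab_anyab_uniqc (ntaxa : Int) : List (Int × Int × Int) :=
  (if ntaxa ≤ 1 then ([] : List (Int × Int × Int)) else []) ++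
  (PySem.List.pyRange 0 ntaxa 1).flatMap (fun recurrent =>
    (PySem.List.pyRange 0 recurrent 1).flatMap (fun female =>
      (PySem.List.pyRange female recurrent 1).map (fun male => (recurrent, female, male)) ++
      (PySem.List.pyRange (recurrent+1) ntaxa 1).map (fun male => (recurrent, female, male))) ++
    (PySem.List.pyRange (recurrent+1) ntaxa 1).flatMap (fun female =>
      (PySem.List.pyRange female ntaxa 1).map (fun male => (recurrent, female, male))))

-- ===== PORT B =====
-- the while-loop of Source B: yield the current state (C, f, m), then advance the male
-- index / carry to the female index / carry to the recurrent index, skipping C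
def pvLoop (n C f m : Int) : List (Int × Int × Int) :=
  (C, f, m) ::
    (let m2 : Int := if m + 1 = C then m + 2 else m + 1
     if hm : m2 < n then pvLoop n C f m2
     else
       let f2 : Int := if f + 1 = C then f + 2 else f + 1
       if hf : f2 < n then pvLoop n C f2 f2
       else
         if hc : C + 1 < n then pvLoop n (C+1) 0 0
         else [])
termination_by ((n - C).toNat, (n - f).toNat, (n - m).toNat)
decreasing_by
  · apply Prod.Lex.right
    apply Prod.Lex.right
    have hm' : (if _h : m + 1 = C then m + 2 else m + 1 : Int) < n := hm
    by_cases h : m + 1 = C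
    · rw [dif_pos h] at hm' ⊢; omega
    · rw [dif_neg h] at hm' ⊢; omega
  · apply Prod.Lex.right
    apply Prod.Lex.left
    have hf' : (if _h : f + 1 = C then f + 2 else f + 1 : Int) < n := hf
    by_cases h : f + 1 = C
    · rw [dif_pos h] at hf' ⊢; omega
    · rw [dif_neg h] at hf' ⊢; omega
  · apply Prod.Lex.left
    omega

def threewayix_symab_anyab_uniqc_alt (ntaxa : Int) : List (Int × Int × Int) :=
  if ntaxa < 2 then [] else pvLoop ntaxa 0 1 1

-- ===== PRECONDITION & SPEC =====
def Spec_threewayix_symab_anyab_uniqc (ntaxa : Int) (out : List (Int × Int × Int)) : Prop := out = threewayix_symab_anyab_uniqc_alt ntaxa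
instance (ntaxa : Int) (out : List (Int × Int × Int)) : Decidable (Spec_threewayix_symab_anyab_uniqc ntaxa out) := by unfold Spec_threewayix_symab_anyab_uniqc; infer_instance

-- ===== CLAIM =====
def Claim_equal_threewayix_symab_anyab_uniqc : Prop := ∀ (ntaxa : Int), Dom_threewayix_symab_anyab_uniqc ntaxa → Spec_threewayix_symab_anyab_uniqc ntaxa (threewayix_symab_anyab_uniqc ntaxa)

-- ===== LEMMAS AND PROOFS =====

-- the successor of x within {0,…,n-1} \ {C}
def pvNext (C x : Int) : Int := if x + 1 = C then x + 2 else x + 1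

-- remaining males from m on, for recurrent parent C
def pvMalesFrom (n C m : Int) : List Int :=
  if m < C then PySem.List.pyRange m C 1 ++ PySem.List.pyRange (C+1) n 1
  else PySem.List.pyRange m n 1

-- A's per-recurrent body
def pvBodyA (n C : Int) : List (Int × Int × Int) :=
  (PySem.List.pyRange 0 C 1).flatMap (fun female =>
    (PySem.List.pyRange female C 1).map (fun male => (C, female, male)) ++
    (PySem.List.pyRange (C+1) n 1).map (fun male => (C, female, male))) ++
  (PySem.List.pyRange (C+1) n 1).flatMap (fun female =>
    (PySem.List.pyRange female n 1).map (fun male => (C, female, male)))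

-- what pvLoop produces from a valid state
def pvSpec (n C f m : Int) : List (Int × Int × Int) :=
  (pvMalesFrom n C m).map (fun male => (C, f, male)) ++
  (pvMalesFrom n C (pvNext C f)).flatMap (fun f' =>
    (pvMalesFrom n C f').map (fun male => (C, f', male))) ++
  (PySem.List.pyRange (C+1) n 1).flatMap (fun C' => pvBodyA n C')

theorem pvMalesFrom_cons (n C m : Int) (_hC : C < n) (hne : m ≠ C) (hm : m < n) :
    pvMalesFrom n C m = m :: pvMalesFrom n C (pvNext C m) := by
  unfold pvNext
  by_cases h1 : m + 1 = C
  · rw [if_pos h1]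
    have hmC : m < C := by omega
    unfold pvMalesFrom
    rw [if_pos hmC, if_neg (by omega : ¬ m + 2 < C)]
    rw [PySem.List.pyRange_one_cons hmC, PySem.List.pyRange_one_eq_nil (by omega : C ≤ m + 1)]
    rw [show m + 2 = C + 1 from by omega]
    simp
  · rw [if_neg h1]
    unfold pvMalesFrom
    rcases lt_trichotomy m C with h | h | h
    · rw [if_pos h, if_pos (by omega : m + 1 < C), PySem.List.pyRange_one_cons h]
      simp
    · exact absurd h hne
    · rw [if_neg (by omega), if_neg (by omega), PySem.List.pyRange_one_cons hm]

theorem pvMalesFrom_nil (n C m : Int) (hC : C < n) (hm : n ≤ m) :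
    pvMalesFrom n C m = [] := by
  unfold pvMalesFrom
  rw [if_neg (by omega)]
  exact PySem.List.pyRange_one_eq_nil (by omega)

-- unrolling one female out of a female loop over the remaining candidates
theorem pvFC (n C x : Int) (F : Int → List (Int × Int × Int)) (hC : C < n)
    (hx : x ≠ C) (hxn : x < n) :
    (pvMalesFrom n C x).flatMap F = F x ++ (pvMalesFrom n C (pvNext C x)).flatMap F := by
  rw [pvMalesFrom_cons n C x hC hx hxn, List.flatMap_cons]

-- A's per-recurrent body is the fused female loop over the remaining candidates
theorem pvBodyA_eq (n C : Int) (h0 : 0 ≤ C) (hC : C < n) :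
    pvBodyA n C = (pvMalesFrom n C (if C = 0 then 1 else 0)).flatMap (fun f' =>
      (pvMalesFrom n C f').map (fun male => (C, f', male))) := by
  unfold pvBodyA
  by_cases hz : C = 0
  · subst hz
    rw [if_pos rfl]
    have h1 : pvMalesFrom n 0 1 = PySem.List.pyRange 1 n 1 := by
      unfold pvMalesFrom; rw [if_neg (by omega)]
    rw [h1, PySem.List.pyRange_one_eq_nil (le_refl 0)]
    simp only [List.flatMap_nil, List.nil_append]
    apply List.flatMap_congr
    intro f hf
    have := (PySem.List.mem_pyRange_one).mp hf
    unfold pvMalesFrom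
    rw [if_neg (by omega)]
  · rw [if_neg hz]
    have h0' : pvMalesFrom n C 0 = PySem.List.pyRange 0 C 1 ++ PySem.List.pyRange (C+1) n 1 := by
      unfold pvMalesFrom; rw [if_pos (by omega)]
    rw [h0', List.flatMap_append]
    congr 1
    · apply List.flatMap_congr
      intro f hf
      have := (PySem.List.mem_pyRange_one).mp hf
      unfold pvMalesFrom
      rw [if_pos this.2]
      simp
    · apply List.flatMap_congr
      intro f hf
      have := (PySem.List.mem_pyRange_one).mp hf
      unfold pvMalesFrom
      rw [if_neg (by omega)]

-- the ite successor and the dite from pvLoop's body agree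
theorem pvNext_dite (C x : Int) : (if _h : x + 1 = C then x + 2 else x + 1 : Int) = pvNext C x := by
  unfold pvNext
  by_cases h : x + 1 = C
  · rw [dif_pos h, if_pos h]
  · rw [dif_neg h, if_neg h]

-- one unfolding step of pvLoop, phrased with pvNext
theorem pvLoop_unfold (n C f m : Int) :
    pvLoop n C f m = (C, f, m) ::
      (if pvNext C m < n then pvLoop n C f (pvNext C m)
       else if pvNext C f < n then pvLoop n C (pvNext C f) (pvNext C f)
       else if C + 1 < n then pvLoop n (C+1) 0 0
       else []) := by
  rw [pvLoop]
  rfl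

-- main loop invariant, by the functional induction of pvLoop
theorem pvLoop_eq_spec (n : Int) : ∀ (C f m : Int),
    0 ≤ C → C < n → 0 ≤ f → f ≠ C → f < n → f ≤ m → m ≠ C → m < n →
    pvLoop n C f m = pvSpec n C f m := by
  intro C f m
  induction C, f, m using pvLoop.induct n with
  | _ C f m ihm ihf ihc =>
    intro h1 h2 h3 h4 h5 h6 h7 h8
    rw [pvNext_dite] at ihm ihf
    rw [pvLoop_unfold]
    by_cases hm2 : pvNext C m < n
    · rw [if_pos hm2]
      have hb : m + 1 ≤ pvNext C m ∧ pvNext C m ≠ C := by unfold pvNext; split <;> omega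
      rw [ihm hm2 h1 h2 h3 h4 h5 (by omega) hb.2 hm2]
      unfold pvSpec
      rw [pvMalesFrom_cons n C m h2 h7 h8]
      simp
    · rw [if_neg hm2]
      have hmnil : pvMalesFrom n C (pvNext C m) = [] :=
        pvMalesFrom_nil n C _ h2 (by omega)
      by_cases hf2 : pvNext C f < n
      · rw [if_pos hf2]
        have hb : f + 1 ≤ pvNext C f ∧ pvNext C f ≠ C := by unfold pvNext; split <;> omega
        rw [ihf hf2 h1 h2 (by omega) hb.2 hf2 (le_refl _) hb.2 hf2]
        unfold pvSpec
        rw [pvMalesFrom_cons n C m h2 h7 h8, hmnil,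
            pvFC n C (pvNext C f) _ h2 hb.2 hf2]
        simp [List.append_assoc]
      · rw [if_neg hf2]
        have hfnil : pvMalesFrom n C (pvNext C f) = [] :=
          pvMalesFrom_nil n C _ h2 (by omega)
        by_cases hc : C + 1 < n
        · rw [if_pos hc]
          rw [ihc hc (by omega) hc (le_refl 0) (by omega) (by omega) (le_refl 0) (by omega) (by omega)]
          unfold pvSpec
          rw [pvMalesFrom_cons n C m h2 h7 h8, hmnil, hfnil]
          rw [PySem.List.pyRange_one_cons hc]
          rw [List.flatMap_cons]
          rw [pvBodyA_eq n (C+1) (by omega) hc, if_neg (by omega)]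
          rw [pvFC n (C+1) 0 _ hc (by omega) (by omega)]
          simp [List.append_assoc]
        · rw [if_neg hc]
          unfold pvSpec
          rw [pvMalesFrom_cons n C m h2 h7 h8, hmnil, hfnil,
              PySem.List.pyRange_one_eq_nil (by omega)]
          simp

-- A as the flat list of its per-recurrent bodies
theorem portA_eq (n : Int) :
    threewayix_symab_anyab_uniqc n =
      (PySem.List.pyRange 0 n 1).flatMap (fun C => pvBodyA n C) := by
  unfold threewayix_symab_anyab_uniqc pvBodyA
  rw [ite_self, List.nil_append]

-- ===== VERDICT =====
theorem threewayix_symab_anyab_uniqc_spec : Claim_equal_threewayix_symab_anyab_uniqc := by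
  intro n _
  unfold Spec_threewayix_symab_anyab_uniqc threewayix_symab_anyab_uniqc_alt
  rw [portA_eq]
  by_cases h2 : n < 2
  · rw [if_pos h2]
    by_cases h1 : n ≤ 0
    · rw [PySem.List.pyRange_one_eq_nil h1]; simp
    · have : n = 1 := by omega
      subst this
      decide
  · rw [if_neg h2]
    rw [pvLoop_eq_spec n 0 1 1 (le_refl 0) (by omega) (by omega) (by omega)
        (by omega) (le_refl 1) (by omega) (by omega)]
    unfold pvSpec
    rw [PySem.List.pyRange_one_cons (by omega : (0:Int) < n)]
    rw [List.flatMap_cons]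
    congr 1
    rw [pvBodyA_eq n 0 (le_refl 0) (by omega), if_pos rfl]
    rw [pvFC n 0 1 _ (by omega) (by omega) (by omega)]
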